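-- pv_equiv track=rewrite | github.com/ad1269/BasketballAnalytics | stats.py | get_top_fantasy_stats_table
-- ===== SOURCE A (Python) =====
-- def get_top_fantasy_stats_table(fantasy_stats_table, player_values, N=-1):
--     top_table = []
--     for i in range(len(fantasy_stats_table)):
--         name = player_values[i][0]
--         for row in fantasy_stats_table:
--             if name == row[0]:
--                 top_table.append(row)
--     return top_table[:N]
-- ===== SOURCE B (Python) =====
-- def get_top_fantasy_stats_table(fantasy_stats_table, player_values, N=-1):
--     index = {}
--     for row in fantasy_stats_table:
--         index.setdefault(row[0], []).append(row)
--     top_table = []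
--     for pv in player_values[:len(fantasy_stats_table)]:
--         top_table.extend(index.get(pv[0], []))
--     return top_table[:N]
-- ===== Notes on version B (the rewrite author's own statement) =====
-- stated objective: alternative
-- what changed: Replaces A's inner scan of fantasy_stats_table for every name by a dict from name to its rows built once, then a single lookup pass over the names (O(n+m+output) instead of O(n*m); a timing run did not confirm a speedup on its all-equal-names inputs, where the output itself is quadratic, so no speed is claimed).
import Mathlib
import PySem

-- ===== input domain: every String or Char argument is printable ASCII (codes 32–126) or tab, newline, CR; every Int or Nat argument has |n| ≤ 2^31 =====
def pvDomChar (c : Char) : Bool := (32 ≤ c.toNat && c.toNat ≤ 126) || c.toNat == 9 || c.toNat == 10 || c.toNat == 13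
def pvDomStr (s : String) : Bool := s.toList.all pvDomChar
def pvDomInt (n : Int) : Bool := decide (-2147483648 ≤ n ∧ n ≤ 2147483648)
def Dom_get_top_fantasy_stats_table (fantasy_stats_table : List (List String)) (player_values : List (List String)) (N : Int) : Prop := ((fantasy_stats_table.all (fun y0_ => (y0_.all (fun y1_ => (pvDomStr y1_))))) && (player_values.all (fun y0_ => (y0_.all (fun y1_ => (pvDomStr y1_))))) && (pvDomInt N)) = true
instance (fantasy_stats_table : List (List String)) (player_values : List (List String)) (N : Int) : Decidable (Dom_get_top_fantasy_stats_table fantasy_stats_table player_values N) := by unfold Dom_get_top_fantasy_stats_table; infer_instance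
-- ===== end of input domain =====

-- B replaces A's inner scan of fantasy_stats_table per name by a dict name → rows built once
-- and a single lookup pass (a different algorithm; no speed is claimed). Return-value equivalence only.

-- ===== PORT A =====
def get_top_fantasy_stats_table (fantasy_stats_table : List (List String)) (player_values : List (List String)) (N : Int) : List (List String) :=
  let top_table :=
    (PySem.List.pyRange 0 (fantasy_stats_table.length : Int) 1).foldl
      (fun acc i =>
        let name := PySem.List.pyGetD (PySem.List.pyGetD player_values i []) 0 ""
        fantasy_stats_table.foldl
          (fun acc2 row => if name = PySem.List.pyGetD row 0 "" then acc2 ++ [row] else acc2)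
          acc)
      []
  PySem.List.slice top_table none (some N)

-- ===== PORT B =====
def get_top_fantasy_stats_table_alt (fantasy_stats_table : List (List String)) (player_values : List (List String)) (N : Int) : List (List String) :=
  let index : PySem.Dict String (List (List String)) :=
    fantasy_stats_table.foldl
      (fun d row =>
        let k := PySem.List.pyGetD row 0 ""
        d.insert k (d.getD k [] ++ [row]))
      PySem.Dict.empty
  let top_table :=
    (PySem.List.slice player_values none (some (fantasy_stats_table.length : Int))).foldl
      (fun acc pv => acc ++ index.getD (PySem.List.pyGetD pv 0 "") [])
      []
  PySem.List.slice top_table none (some N)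

-- ===== PRECONDITION & SPEC =====
-- Pre_ excludes exactly the inputs where Python A raises (IndexError): player_values shorter
-- than fantasy_stats_table, or an empty row reached by [0]-indexing.
def Pre_get_top_fantasy_stats_table (fantasy_stats_table : List (List String)) (player_values : List (List String)) (N : Int) : Prop :=
  fantasy_stats_table.length ≤ player_values.length ∧
  (∀ r ∈ fantasy_stats_table, r ≠ []) ∧
  (∀ r ∈ player_values.take fantasy_stats_table.length, r ≠ [])
instance (fantasy_stats_table : List (List String)) (player_values : List (List String)) (N : Int) : Decidable (Pre_get_top_fantasy_stats_table fantasy_stats_table player_values N) := by unfold Pre_get_top_fantasy_stats_table; infer_instance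

def pvWitness_get_top_fantasy_stats_table : List (List String) × List (List String) × Int :=
  ([["a", "3"], ["b", "2"], ["a", "1"]], [["b"], ["a"], ["c"]], -1)

def Spec_get_top_fantasy_stats_table (fantasy_stats_table : List (List String)) (player_values : List (List String)) (N : Int) (out : List (List String)) : Prop := out = get_top_fantasy_stats_table_alt fantasy_stats_table player_values N
instance (fantasy_stats_table : List (List String)) (player_values : List (List String)) (N : Int) (out : List (List String)) : Decidable (Spec_get_top_fantasy_stats_table fantasy_stats_table player_values N out) := by unfold Spec_get_top_fantasy_stats_table; infer_instance

-- ===== CLAIM (what is proved, stated in full; the proofs are below) =====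
def Claim_equal_get_top_fantasy_stats_table : Prop := ∀ (fantasy_stats_table : List (List String)) (player_values : List (List String)) (N : Int), Dom_get_top_fantasy_stats_table fantasy_stats_table player_values N → Pre_get_top_fantasy_stats_table fantasy_stats_table player_values N → Spec_get_top_fantasy_stats_table fantasy_stats_table player_values N (get_top_fantasy_stats_table fantasy_stats_table player_values N)


-- ===== LEMMAS AND PROOFS =====

-- A's inner scan over the whole table is the filter of rows whose first entry equals `name`.
theorem pvInnerScan (fst : List (List String)) (name : String) (acc : List (List String)) :
    fst.foldl (fun acc2 row => if name = PySem.List.pyGetD row 0 "" then acc2 ++ [row] else acc2) acc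
      = acc ++ fst.filter (fun row => decide (name = PySem.List.pyGetD row 0 "")) := by
  simpa using PySem.List.foldl_append_ite (fun row => name = PySem.List.pyGetD row 0 "") id fst acc

-- B's grouping dict, looked up at k, yields exactly that filter.
theorem pvDictGroup (fst : List (List String)) (k : String)
    (d : PySem.Dict String (List (List String))) :
    (fst.foldl (fun d row =>
        let kr := PySem.List.pyGetD row 0 ""
        d.insert kr (d.getD kr [] ++ [row])) d).getD k []
      = d.getD k [] ++ fst.filter (fun row => decide (k = PySem.List.pyGetD row 0 "")) := by
  induction fst generalizing d with
  | nil => simp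
  | cons r rs ih =>
    simp only [List.foldl_cons, List.filter_cons, ih, PySem.Dict.getD_insert]
    by_cases h : k = PySem.List.pyGetD r 0 ""
    · simp [h]
    · simp [h]

-- ===== VERDICT (by name: the statement is the Claim_ definition above) =====
theorem get_top_fantasy_stats_table_spec : Claim_equal_get_top_fantasy_stats_table := by
  intro fst pv N _ hpre
  obtain ⟨hlen, _, _⟩ := hpre
  unfold Spec_get_top_fantasy_stats_table get_top_fantasy_stats_table get_top_fantasy_stats_table_alt
  simp only []
  congr 1
  -- B's slice of player_values is the take of the first |fst| names
  rw [PySem.List.slice_to_natCast]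
  -- rewrite A's indexed loop to a loop over that prefix
  have hcongr :
      (PySem.List.pyRange 0 (fst.length : Int) 1).foldl
        (fun acc i =>
          (fst.foldl
            (fun acc2 row => if PySem.List.pyGetD (PySem.List.pyGetD pv i []) 0 "" = PySem.List.pyGetD row 0 "" then acc2 ++ [row] else acc2)
            acc))
        ([] : List (List String))
      = (PySem.List.pyRange 0 (fst.length : Int) 1).foldl
        (fun acc i =>
          (fst.foldl
            (fun acc2 row => if PySem.List.pyGetD (PySem.List.pyGetD (pv.take fst.length) i []) 0 "" = PySem.List.pyGetD row 0 "" then acc2 ++ [row] else acc2)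
            acc))
        ([] : List (List String)) := by
    apply PySem.List.foldl_congr_mem
    intro acc i hi
    have hi' := (PySem.List.mem_pyRange_one).1 hi
    have h0 : 0 ≤ i := hi'.1
    have hlt : i < (fst.length : Int) := hi'.2
    have hnat : i.toNat < fst.length := by omega
    rw [PySem.List.pyGetD_eq_getElem pv ([] : List String) h0 (by simpa using lt_of_lt_of_le hlt (by exact_mod_cast hlen)),
        PySem.List.pyGetD_eq_getElem (pv.take fst.length) ([] : List String) h0 (by simp; omega)]
    congr 1
    simp [List.getElem_take]
  rw [hcongr]
  have htk : ((pv.take fst.length).length : Int) = (fst.length : Int) := by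
    simp; omega
  rw [← htk]
  rw [PySem.List.foldl_pyRange_zero_pyGetD' (pv.take fst.length) ([] : List String)
        (fun acc p =>
          fst.foldl (fun acc2 row => if PySem.List.pyGetD p 0 "" = PySem.List.pyGetD row 0 "" then acc2 ++ [row] else acc2) acc)
        ([] : List (List String))]
  apply PySem.List.foldl_congr_mem
  intro acc p _
  rw [pvInnerScan, pvDictGroup]
  simp
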